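-- pv_equiv track=rewrite | github.com/Parushgit/InterestingCodes | password.py | solution
-- ===== SOURCE A (Python) =====
-- def solution(S):
--     # write your code in Python 3.6
--     l, r, maximum = 0, 0, 0
--     while(r < len(S)):
--         while(r < len(S)) and S[r].isdigit(): #checking if the number is a digit
--             r = r+1
--         upper = False
--         l = r
--
--         while(r < len(S)) and not S[r].isdigit(): #checking if the number is not a digit
--             if(S[r].isupper()): #checking if the number is a upper case character
--                 upper = True
--             r = r+1
--
--         if upper:
--             maximum = max(maximum, r - l) #computing the maximum in order to get the longest substring
--
--     return -1 if maximum == 0 else maximum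
--
--     pass
-- ===== SOURCE B (Python) =====
-- def solution(S):
--     # single left-to-right pass: track current non-digit run length and whether
--     # it contains an uppercase letter; update the maximum on the fly
--     maximum = cur = 0
--     has_upper = False
--     for c in S:
--         if c.isdigit():
--             cur = 0
--             has_upper = False
--         else:
--             cur += 1
--             if c.isupper():
--                 has_upper = True
--             if has_upper and cur > maximum:
--                 maximum = cur
--     return -1 if maximum == 0 else maximum
-- ===== Notes on version B (the rewrite author's own statement) =====
-- stated objective: simpler
-- what changed: Replaces the two-pointer nested while loops over indices with a single for-loop over characters that maintains (current run length, has-upper flag, running maximum).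
import Mathlib
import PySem

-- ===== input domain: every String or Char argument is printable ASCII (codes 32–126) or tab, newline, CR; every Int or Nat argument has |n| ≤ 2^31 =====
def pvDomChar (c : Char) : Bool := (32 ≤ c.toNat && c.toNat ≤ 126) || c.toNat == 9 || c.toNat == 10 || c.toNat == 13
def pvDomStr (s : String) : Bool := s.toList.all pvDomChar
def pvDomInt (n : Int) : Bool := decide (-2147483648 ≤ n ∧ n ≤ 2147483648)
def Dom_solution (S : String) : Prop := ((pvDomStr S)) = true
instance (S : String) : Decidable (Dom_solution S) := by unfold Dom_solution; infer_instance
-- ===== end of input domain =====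

-- B replaces A's two-pointer nested while loops by a single per-character pass
-- maintaining (maximum, current run length, has-upper flag); objective: simpler.

-- ===== PORT A =====
-- inner loop `while r < len(S) and S[r].isdigit(): r += 1`
def skipDig (cs : List Char) (r : Nat) : Nat :=
  if h : r < cs.length then
    if PySem.Chars.isdigit cs[r] then skipDig cs (r+1) else r
  else r
termination_by cs.length - r

-- inner loop `while r < len(S) and not S[r].isdigit(): if S[r].isupper(): upper = True; r += 1`
def scanNonDig (cs : List Char) (r : Nat) (upper : Bool) : Nat × Bool :=
  if h : r < cs.length then
    if PySem.Chars.isdigit cs[r] then (r, upper)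
    else scanNonDig cs (r+1) (if PySem.Chars.isupper cs[r] then true else upper)
  else (r, upper)
termination_by cs.length - r

theorem skipDig_ge (cs : List Char) (r : Nat) : r ≤ skipDig cs r := by
  unfold skipDig
  split
  · split
    · exact Nat.le_trans (Nat.le_succ r) (skipDig_ge cs (r+1))
    · exact Nat.le_refl r
  · exact Nat.le_refl r
termination_by cs.length - r

theorem scanNonDig_ge (cs : List Char) (r : Nat) (u : Bool) : r ≤ (scanNonDig cs r u).1 := by
  unfold scanNonDig
  split
  · split
    · exact Nat.le_refl r
    · exact Nat.le_trans (Nat.le_succ r) (scanNonDig_ge cs (r+1) _)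
  · exact Nat.le_refl r
termination_by cs.length - r

theorem scan_skip_gt (cs : List Char) (r : Nat) (h : r < cs.length) :
    r < (scanNonDig cs (skipDig cs r) false).1 := by
  by_cases hd : PySem.Chars.isdigit cs[r] = true
  · have h1 : skipDig cs r = skipDig cs (r+1) := by
      conv_lhs => unfold skipDig
      simp [h, hd]
    have h2 : r + 1 ≤ skipDig cs (r+1) := skipDig_ge cs (r+1)
    have h3 := scanNonDig_ge cs (skipDig cs r) false
    omega
  · have h1 : skipDig cs r = r := by
      unfold skipDig; simp [h, hd]
    have h2 : scanNonDig cs r false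
        = scanNonDig cs (r+1) (if PySem.Chars.isupper cs[r] then true else false) := by
      conv_lhs => unfold scanNonDig
      simp [h, hd]
    have h3 := scanNonDig_ge cs (r+1) (if PySem.Chars.isupper cs[r] then true else false)
    rw [h1, h2]
    omega

-- outer while loop of A
def loopA (cs : List Char) (r maximum : Nat) : Nat :=
  if h : r < cs.length then
    let r1 := skipDig cs r
    let p := scanNonDig cs r1 false
    loopA cs p.1 (if p.2 then max maximum (p.1 - r1) else maximum)
  else maximum
termination_by cs.length - r
decreasing_by
  have := scan_skip_gt cs r h
  omega

def solution (S : String) : Int :=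
  let m := loopA S.toList 0 0
  if m = 0 then -1 else (m : Int)

-- ===== PORT B =====
-- body of B's for-loop: state = (maximum, cur, has_upper)
def stepB (st : Nat × Nat × Bool) (c : Char) : Nat × Nat × Bool :=
  if PySem.Chars.isdigit c then (st.1, 0, false)
  else
    let cur := st.2.1 + 1
    let hasU := if PySem.Chars.isupper c then true else st.2.2
    (if hasU && decide (st.1 < cur) then cur else st.1, cur, hasU)

def solution_alt (S : String) : Int :=
  let st := S.toList.foldl stepB (0, 0, false)
  if st.1 = 0 then -1 else (st.1 : Int)

-- ===== PRECONDITION & SPEC =====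
def Spec_solution (S : String) (out : Int) : Prop := out = solution_alt S
instance (S : String) (out : Int) : Decidable (Spec_solution S out) := by unfold Spec_solution; infer_instance

-- ===== CLAIM (what is proved, stated in full; the proofs are below) =====
def Claim_equal_solution : Prop := ∀ (S : String), Dom_solution S → Spec_solution S (solution S)

-- ===== LEMMAS AND PROOFS =====

theorem skipDig_le (cs : List Char) (r : Nat) (h : r ≤ cs.length) : skipDig cs r ≤ cs.length := by
  unfold skipDig
  split
  · split
    · exact skipDig_le cs (r+1) (by omega)
    · exact h
  · exact h
termination_by cs.length - r

theorem scanNonDig_le (cs : List Char) (r : Nat) (u : Bool) (h : r ≤ cs.length) :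
    (scanNonDig cs r u).1 ≤ cs.length := by
  unfold scanNonDig
  split
  · split
    · exact h
    · exact scanNonDig_le cs (r+1) _ (by omega)
  · exact h
termination_by cs.length - r

theorem scanNonDig_stop (cs : List Char) (r : Nat) (u : Bool)
    (h2 : (scanNonDig cs r u).1 < cs.length) :
    PySem.Chars.isdigit (cs[(scanNonDig cs r u).1]'h2) = true := by
  by_cases hr : r < cs.length
  · by_cases hd : PySem.Chars.isdigit cs[r] = true
    · have hs : scanNonDig cs r u = (r, u) := by
        unfold scanNonDig; simp [hr, hd]
      simp only [hs] at h2 ⊢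
      exact hd
    · have hs : scanNonDig cs r u
          = scanNonDig cs (r+1) (if PySem.Chars.isupper cs[r] then true else u) := by
        conv_lhs => unfold scanNonDig
        simp [hr, hd]
      simp only [hs] at h2 ⊢
      exact scanNonDig_stop cs (r+1) _ h2
  · have hs : scanNonDig cs r u = (r, u) := by
      unfold scanNonDig; simp [hr]
    simp only [hs] at h2
    omega
termination_by cs.length - r

theorem skip_fold (cs : List Char) (r : Nat) (m0 : Nat) :
    List.foldl stepB (m0, 0, false) (cs.drop r)
      = List.foldl stepB (m0, 0, false) (cs.drop (skipDig cs r)) := by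
  by_cases hr : r < cs.length
  · by_cases hd : PySem.Chars.isdigit cs[r] = true
    · have h1 : skipDig cs r = skipDig cs (r+1) := by
        conv_lhs => unfold skipDig
        simp [hr, hd]
      rw [h1, List.drop_eq_getElem_cons hr]
      simp only [List.foldl_cons]
      have hs : stepB (m0, 0, false) cs[r] = (m0, 0, false) := by
        simp [stepB, hd]
      rw [hs]
      exact skip_fold cs (r+1) m0
    · have h1 : skipDig cs r = r := by unfold skipDig; simp [hr, hd]
      rw [h1]
  · have h1 : skipDig cs r = r := by unfold skipDig; simp [hr]
    rw [h1]
termination_by cs.length - r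

theorem scan_fold (cs : List Char) (r : Nat) (cur : Nat) (u : Bool) (m0 : Nat) :
    List.foldl stepB ((if u then max m0 cur else m0), cur, u) (cs.drop r)
      = List.foldl stepB
          ((if (scanNonDig cs r u).2 then max m0 (cur + ((scanNonDig cs r u).1 - r)) else m0),
           cur + ((scanNonDig cs r u).1 - r), (scanNonDig cs r u).2)
          (cs.drop (scanNonDig cs r u).1) := by
  by_cases hr : r < cs.length
  · by_cases hd : PySem.Chars.isdigit cs[r] = true
    · have hs : scanNonDig cs r u = (r, u) := by
        unfold scanNonDig; simp [hr, hd]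
      rw [hs]
      simp
    · have hs : scanNonDig cs r u
          = scanNonDig cs (r+1) (if PySem.Chars.isupper cs[r] then true else u) := by
        conv_lhs => unfold scanNonDig
        simp [hr, hd]
      set u' := (if PySem.Chars.isupper cs[r] then true else u) with hu'
      rw [hs, List.drop_eq_getElem_cons hr]
      simp only [List.foldl_cons]
      have hstep : stepB ((if u then max m0 cur else m0), cur, u) cs[r]
          = ((if u' then max m0 (cur+1) else m0), cur + 1, u') := by
        cases hcu : PySem.Chars.isupper cs[r] <;> cases u <;>
          simp [stepB, hd, hcu, hu'] <;> split_ifs <;> omega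
      rw [hstep]
      have hge := scanNonDig_ge cs (r+1) u'
      have hrec := scan_fold cs (r+1) (cur+1) u' m0
      rw [hrec]
      have harith : cur + 1 + ((scanNonDig cs (r+1) u').1 - (r+1))
          = cur + ((scanNonDig cs (r+1) u').1 - r) := by omega
      rw [harith]
  · have hs : scanNonDig cs r u = (r, u) := by
      unfold scanNonDig; simp [hr]
    rw [hs]
    simp
termination_by cs.length - r

theorem loopA_eq_fold (cs : List Char) (r : Nat) (m0 : Nat) (h : r ≤ cs.length) :
    loopA cs r m0 = (List.foldl stepB (m0, 0, false) (cs.drop r)).1 := by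
  by_cases hr : r < cs.length
  · have hA : loopA cs r m0
        = loopA cs (scanNonDig cs (skipDig cs r) false).1
            (if (scanNonDig cs (skipDig cs r) false).2
             then max m0 ((scanNonDig cs (skipDig cs r) false).1 - skipDig cs r) else m0) := by
      conv_lhs => unfold loopA
      simp [hr]
    set r1 := skipDig cs r with hr1
    set p := scanNonDig cs r1 false with hp
    have hr1le : r1 ≤ cs.length := skipDig_le cs r (by omega)
    have hple : p.1 ≤ cs.length := scanNonDig_le cs r1 false hr1le
    have hgt : r < p.1 := scan_skip_gt cs r hr
    set m' := (if p.2 then max m0 (p.1 - r1) else m0) with hm'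
    rw [hA]
    rw [skip_fold cs r m0, ← hr1]
    have hsf := scan_fold cs r1 0 false m0
    simp only [if_neg (Bool.false_ne_true), Nat.zero_add, ← hp, ← hm'] at hsf
    rw [hsf]
    have hconv : (List.foldl stepB (m', p.1 - r1, p.2) (cs.drop p.1)).1
        = (List.foldl stepB (m', 0, false) (cs.drop p.1)).1 := by
      by_cases hpl : p.1 < cs.length
      · have hdig := scanNonDig_stop cs r1 false (hp ▸ hpl)
        rw [List.drop_eq_getElem_cons hpl]
        simp only [List.foldl_cons]
        have h1 : stepB (m', p.1 - r1, p.2) cs[p.1] = (m', 0, false) := by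
          simp [stepB]; simp only [hp]; simp [hdig]
        have h2 : stepB (m', 0, false) cs[p.1] = (m', 0, false) := by
          simp [stepB]; simp only [hp]; simp [hdig]
        rw [h1, h2]
      · have hnil : cs.drop p.1 = [] := List.drop_eq_nil_of_le (by omega)
        simp [hnil]
    rw [hconv]
    exact loopA_eq_fold cs p.1 m' hple
  · have hA : loopA cs r m0 = m0 := by unfold loopA; simp [hr]
    have hnil : cs.drop r = [] := List.drop_eq_nil_of_le (by omega)
    rw [hA, hnil]; rfl
termination_by cs.length - r
decreasing_by
  have h1 := scan_skip_gt cs r hr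
  have h2 := scanNonDig_le cs (skipDig cs r) false (skipDig_le cs r (Nat.le_of_lt hr))
  omega

-- ===== VERDICT (by name: the statement is the Claim_ definition above) =====
theorem solution_spec : Claim_equal_solution := by
  intro S _
  unfold Spec_solution solution solution_alt
  rw [loopA_eq_fold S.toList 0 0 (Nat.zero_le _)]
  simp
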